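-- pv_equiv track=rewrite | github.com/hungngo04/EyeGazeToText | emnlp_touchless_typing_train.py | convert_to_cluster_sequence
-- ===== SOURCE A (Python) =====
-- CLUSTER_MAPS = {
--     9: {"qwe": "1", "rtyu": "2", "iop": "3", "asd": "4", "fgh": "5", "jkl": "6", "zxcv": "7", "bnm": "9"},
--     7: {"qwert": "1", "yuiop": "2", "asdfg": "3", "hjkl": "4", "zxc": "5", "vbnm": "6"},
--     5: {"qweasdz": "1", "rtfgxc": "2", "yuhjvb": "3", "iopklnm": "4"},
--     3: {"qwertasdfgzxc": "1", "yuiophjklvbnm": "2"},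
-- }
--
-- def build_char_map(num_clusters):
--     char_map = {}
--     for keys, digit in CLUSTER_MAPS[num_clusters].items():
--         for ch in keys:
--             char_map[ch] = digit
--     return char_map
--
-- def convert_to_cluster_sequence(text, num_clusters):
--     char_map = build_char_map(num_clusters)
--     result = []
--     for c in text.lower():
--         if c.isalpha():
--             result.append(char_map.get(c, ""))
--         elif c == " ":
--             result.append(" ")
--     return "".join(result)
-- ===== SOURCE B (Python) =====
-- CLUSTER_MAPS = {
--     9: {"qwe": "1", "rtyu": "2", "iop": "3", "asd": "4", "fgh": "5", "jkl": "6", "zxcv": "7", "bnm": "9"},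
--     7: {"qwert": "1", "yuiop": "2", "asdfg": "3", "hjkl": "4", "zxc": "5", "vbnm": "6"},
--     5: {"qweasdz": "1", "rtfgxc": "2", "yuhjvb": "3", "iopklnm": "4"},
--     3: {"qwertasdfgzxc": "1", "yuiophjklvbnm": "2"},
-- }
--
-- def convert_to_cluster_sequence(text, num_clusters):
--     clusters = CLUSTER_MAPS[num_clusters]
--     out = []
--     for c in text.lower():
--         if c == " ":
--             out.append(" ")
--         elif c.isalpha():
--             for keys, digit in clusters.items():
--                 if c in keys:
--                     out.append(digit)
--                     break
--     return "".join(out)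
-- ===== Notes on version B (the rewrite author's own statement) =====
-- stated objective: alternative
-- what changed: B drops the precomputed inverted char->digit map entirely and instead scans the cluster table's key strings per character (first-match with break), checking the space case before the alpha case.
import Mathlib
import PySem

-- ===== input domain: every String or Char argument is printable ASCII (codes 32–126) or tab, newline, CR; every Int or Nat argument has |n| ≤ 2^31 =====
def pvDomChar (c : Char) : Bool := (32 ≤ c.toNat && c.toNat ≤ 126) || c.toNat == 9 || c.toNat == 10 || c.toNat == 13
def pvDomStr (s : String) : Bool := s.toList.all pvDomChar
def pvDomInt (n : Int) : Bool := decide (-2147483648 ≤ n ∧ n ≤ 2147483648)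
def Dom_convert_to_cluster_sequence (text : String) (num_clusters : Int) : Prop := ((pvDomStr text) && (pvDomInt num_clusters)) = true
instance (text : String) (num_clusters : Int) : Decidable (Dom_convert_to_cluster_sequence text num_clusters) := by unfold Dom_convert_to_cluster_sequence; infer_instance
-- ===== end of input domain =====

-- B replaces A's precomputed inverted char→digit map by a per-character first-match scan of the
-- cluster table's key strings (alternative decomposition, not claimed faster).

-- ===== PORT A =====
-- CLUSTER_MAPS, shared module constant of both Pythons
def pvClusterMaps : PySem.Dict Int (PySem.Dict String String) :=
  PySem.Dict.ofList
    [ (9, PySem.Dict.ofList [("qwe", "1"), ("rtyu", "2"), ("iop", "3"), ("asd", "4"), ("fgh", "5"), ("jkl", "6"), ("zxcv", "7"), ("bnm", "9")]),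
      (7, PySem.Dict.ofList [("qwert", "1"), ("yuiop", "2"), ("asdfg", "3"), ("hjkl", "4"), ("zxc", "5"), ("vbnm", "6")]),
      (5, PySem.Dict.ofList [("qweasdz", "1"), ("rtfgxc", "2"), ("yuhjvb", "3"), ("iopklnm", "4")]),
      (3, PySem.Dict.ofList [("qwertasdfgzxc", "1"), ("yuiophjklvbnm", "2")]) ]

-- helper build_char_map, given the (already looked-up) cluster dict
def pvBuildCharMap (m : PySem.Dict String String) : PySem.Dict Char String :=
  m.items.foldl (fun cm p => p.1.toList.foldl (fun cm ch => cm.insert ch p.2) cm) PySem.Dict.empty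

def convert_to_cluster_sequence (text : String) (num_clusters : Int) : String :=
  match PySem.Dict.get? pvClusterMaps num_clusters with
  | none => ""          -- CLUSTER_MAPS[num_clusters] raises KeyError; excluded by Pre_
  | some m =>
    let char_map := pvBuildCharMap m
    let result : List String :=
      (PySem.Str.lower text).toList.foldl
        (fun acc c =>
          if PySem.Chars.isalpha c then acc ++ [char_map.getD c ""]
          else if c == ' ' then acc ++ [" "]
          else acc) []
    PySem.Str.join "" result

-- ===== PORT B =====
def convert_to_cluster_sequence_alt (text : String) (num_clusters : Int) : String :=
  match PySem.Dict.get? pvClusterMaps num_clusters with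
  | none => ""          -- CLUSTER_MAPS[num_clusters] raises KeyError; excluded by Pre_
  | some clusters =>
    let out : List String :=
      (PySem.Str.lower text).toList.foldl
        (fun acc c =>
          if c == ' ' then acc ++ [" "]
          else if PySem.Chars.isalpha c then
            -- first-match scan with break over clusters.items()
            acc ++ (match clusters.items.find? (fun p => PySem.Chars.isIn [c] p.1.toList) with
                    | some p => [p.2]
                    | none => [])
          else acc) []
    PySem.Str.join "" out

-- ===== PRECONDITION & SPEC =====
-- Pre_ excludes exactly the num_clusters not in {3,5,7,9}, on which both Pythons raise KeyError.
def Pre_convert_to_cluster_sequence (text : String) (num_clusters : Int) : Prop :=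
  num_clusters = 3 ∨ num_clusters = 5 ∨ num_clusters = 7 ∨ num_clusters = 9
instance (text : String) (num_clusters : Int) : Decidable (Pre_convert_to_cluster_sequence text num_clusters) := by unfold Pre_convert_to_cluster_sequence; infer_instance

def pvWitness_convert_to_cluster_sequence : String × Int := ("Hi there", 9)

def Spec_convert_to_cluster_sequence (text : String) (num_clusters : Int) (out : String) : Prop := out = convert_to_cluster_sequence_alt text num_clusters
instance (text : String) (num_clusters : Int) (out : String) : Decidable (Spec_convert_to_cluster_sequence text num_clusters out) := by unfold Spec_convert_to_cluster_sequence; infer_instance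

-- ===== CLAIM (what is proved, stated in full; the proofs are below) =====
def Claim_equal_convert_to_cluster_sequence : Prop := ∀ (text : String) (num_clusters : Int), Dom_convert_to_cluster_sequence text num_clusters → Pre_convert_to_cluster_sequence text num_clusters → Spec_convert_to_cluster_sequence text num_clusters (convert_to_cluster_sequence text num_clusters)

-- ===== LEMMAS AND PROOFS =====

-- a char produced by lowerChar is never an uppercase ASCII letter
lemma pv_isupper_lowerChar (c : Char) : PySem.Chars.isupper (PySem.Chars.lowerChar c) = false := by
  unfold PySem.Chars.lowerChar
  split
  · rename_i h
    unfold PySem.Chars.isupper at h ⊢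
    simp only [Bool.and_eq_true, decide_eq_true_eq, Char.le_def, UInt32.le_iff_toNat_le] at h
    have h1 : 65 ≤ c.toNat := h.1
    have h2 : c.toNat ≤ 90 := h.2
    have hv : (Char.ofNat (c.toNat + 32)).toNat = c.toNat + 32 := by
      rw [Char.toNat_ofNat, if_pos]
      left; omega
    simp only [Bool.and_eq_false_iff, decide_eq_false_iff_not, Char.le_def, UInt32.le_iff_toNat_le]
    right
    have hZ : ('Z').val.toNat = 90 := by decide
    rw [hZ]
    show ¬ ((Char.ofNat (c.toNat + 32)).toNat ≤ 90)
    rw [hv]; omega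
  · rename_i h
    simpa using h

-- enumerate the 26 lowercase letters for a decidable per-char property
lemma pv_enum26 (P : Char → Prop) [DecidablePred P]
    (hall : ∀ n ∈ List.range 26, P (Char.ofNat (97 + n)))
    (c : Char) (h1 : 97 ≤ c.toNat) (h2 : c.toNat ≤ 122) : P c := by
  have hc : c = Char.ofNat (97 + (c.toNat - 97)) := by
    rw [Nat.add_sub_cancel' h1, Char.ofNat_toNat]
  rw [hc]
  exact hall _ (List.mem_range.mpr (by omega))

-- per-char agreement of the two loop bodies, for any concrete cluster dict satisfying the decidable check
lemma pv_step_eq (m : PySem.Dict String String)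
    (hm : ∀ n ∈ List.range 26,
      ((Char.ofNat (97 + n)) == ' ') = false ∧
      PySem.Chars.isalpha (Char.ofNat (97 + n)) = true ∧
      [(pvBuildCharMap m).getD (Char.ofNat (97 + n)) ""] =
        (match m.items.find? (fun p => PySem.Chars.isIn [Char.ofNat (97 + n)] p.1.toList) with
         | some p => [p.2]
         | none => []))
    (acc : List String) (c : Char) (hup : PySem.Chars.isupper c = false) :
    (if PySem.Chars.isalpha c then acc ++ [(pvBuildCharMap m).getD c ""]
     else if c == ' ' then acc ++ [" "] else acc) =
    (if c == ' ' then acc ++ [" "]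
     else if PySem.Chars.isalpha c then
       acc ++ (match m.items.find? (fun p => PySem.Chars.isIn [c] p.1.toList) with
               | some p => [p.2]
               | none => [])
     else acc) := by
  by_cases hlo : PySem.Chars.islower c = true
  · have hb : 97 ≤ c.toNat ∧ c.toNat ≤ 122 := by
      unfold PySem.Chars.islower at hlo
      simp only [Bool.and_eq_true, decide_eq_true_eq, Char.le_def, UInt32.le_iff_toNat_le] at hlo
      exact ⟨hlo.1, hlo.2⟩
    have key := pv_enum26
      (fun c => ((c == ' ') = false ∧ PySem.Chars.isalpha c = true ∧
        [(pvBuildCharMap m).getD c ""] =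
          (match m.items.find? (fun p => PySem.Chars.isIn [c] p.1.toList) with
           | some p => [p.2]
           | none => [])))
      hm c hb.1 hb.2
    obtain ⟨k1, k2, k3⟩ := key
    simp [k1, k2, k3]
  · have hal : PySem.Chars.isalpha c = false := by
      unfold PySem.Chars.isalpha
      simp [hup, Bool.eq_false_iff.mpr hlo]
    simp [hal]

-- ===== VERDICT (by name: the statement is the Claim_ definition above) =====
theorem convert_to_cluster_sequence_spec : Claim_equal_convert_to_cluster_sequence := by
  unfold Claim_equal_convert_to_cluster_sequence
  intro text num_clusters _hdom hpre
  unfold Spec_convert_to_cluster_sequence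
  have main : ∀ (m : PySem.Dict String String),
      (∀ n ∈ List.range 26,
        ((Char.ofNat (97 + n)) == ' ') = false ∧
        PySem.Chars.isalpha (Char.ofNat (97 + n)) = true ∧
        [(pvBuildCharMap m).getD (Char.ofNat (97 + n)) ""] =
          (match m.items.find? (fun p => PySem.Chars.isIn [Char.ofNat (97 + n)] p.1.toList) with
           | some p => [p.2]
           | none => [])) →
      PySem.Dict.get? pvClusterMaps num_clusters = some m →
      convert_to_cluster_sequence text num_clusters = convert_to_cluster_sequence_alt text num_clusters := by
    intro m hm hget
    unfold convert_to_cluster_sequence convert_to_cluster_sequence_alt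
    rw [hget]
    simp only []
    congr 1
    apply PySem.List.foldl_congr_mem
    intro acc c hc
    have hup : PySem.Chars.isupper c = false := by
      rw [PySem.Str.toList_lower] at hc
      unfold PySem.Chars.lower at hc
      obtain ⟨a, _, rfl⟩ := List.mem_map.mp hc
      exact pv_isupper_lowerChar a
    exact pv_step_eq m hm acc c hup
  rcases hpre with h | h | h | h <;> subst h
  · exact main _ (by decide) rfl
  · exact main _ (by decide) rfl
  · exact main _ (by decide) rfl
  · exact main _ (by decide) rfl
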